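-- pv_equiv track=rewrite | github.com/tghanchidnx/Databridge_AI | libs/databridge-discovery/src/databridge_discovery/agents/logic_extractor.py | _split_select_columns
-- ===== SOURCE A (Python) =====
-- def _split_select_columns(select_clause: str) -> list[str]:
--     """Split SELECT columns handling nested parentheses."""
--     columns = []
--     current = ""
--     depth = 0
--
--     for char in select_clause:
--         if char == "(":
--             depth += 1
--         elif char == ")":
--             depth -= 1
--         elif char == "," and depth == 0:
--             columns.append(current.strip())
--             current = ""
--             continue
--         current += char
--
--     if current.strip():
--         columns.append(current.strip())
--
--     return columns
-- ===== SOURCE B (Python) =====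
-- def _split_select_columns(select_clause: str) -> list[str]:
--     """Split SELECT columns handling nested parentheses, by comma tokens."""
--     segments = []
--     buf = None
--     depth = 0
--     for piece in select_clause.split(','):
--         buf = piece if buf is None else buf + ',' + piece
--         depth += piece.count('(') - piece.count(')')
--         if depth == 0:
--             segments.append(buf)
--             buf = None
--     if buf is None:
--         init, last = segments[:-1], segments[-1]
--     else:
--         init, last = segments, buf
--     stripped = last.strip()
--     return [s.strip() for s in init] + ([stripped] if stripped else [])
-- ===== Notes on version B (the rewrite author's own statement) =====
-- stated objective: faster
-- what changed: B replaces A's per-character state machine (with O(n^2) string concatenation current += char) by one pass over the comma-separated tokens from str.split, re-merging tokens with a running parenthesis-depth counter and closing a segment whenever the depth returns to zero.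
import Mathlib
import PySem

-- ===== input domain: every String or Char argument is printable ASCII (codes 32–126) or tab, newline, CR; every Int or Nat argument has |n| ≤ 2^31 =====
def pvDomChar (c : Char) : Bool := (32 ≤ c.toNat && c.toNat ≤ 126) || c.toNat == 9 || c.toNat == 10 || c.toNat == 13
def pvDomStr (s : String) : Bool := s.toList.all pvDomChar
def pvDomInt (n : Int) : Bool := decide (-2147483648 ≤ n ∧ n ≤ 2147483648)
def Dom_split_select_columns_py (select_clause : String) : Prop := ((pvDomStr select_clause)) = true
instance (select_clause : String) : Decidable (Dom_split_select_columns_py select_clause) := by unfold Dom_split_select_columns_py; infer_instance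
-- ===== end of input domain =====

-- B splits the string into comma tokens and re-merges them with a running depth counter
-- instead of A's per-character state machine; measurably faster in Python, same results.

-- ===== PORT A =====
-- state: (columns, current, depth)
def pvStepA (st : List String × List Char × Int) (c : Char) : List String × List Char × Int :=
  if c = '(' then (st.1, st.2.1 ++ [c], st.2.2 + 1)
  else if c = ')' then (st.1, st.2.1 ++ [c], st.2.2 - 1)
  else if c = ',' ∧ st.2.2 = 0 then (st.1 ++ [String.mk (PySem.Chars.strip st.2.1)], [], st.2.2)
  else (st.1, st.2.1 ++ [c], st.2.2)

def pvFinishA (st : List String × List Char × Int) : List String :=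
  if PySem.Chars.strip st.2.1 ≠ [] then st.1 ++ [String.mk (PySem.Chars.strip st.2.1)] else st.1

def split_select_columns_py (select_clause : String) : List String :=
  pvFinishA (select_clause.toList.foldl pvStepA ([], [], 0))

-- ===== PORT B =====
-- state: (segments, buf, depth); `piece.count('(')` on a single-char pattern is List.count
def pvStepB (st : List (List Char) × Option (List Char) × Int) (piece : List Char) :
    List (List Char) × Option (List Char) × Int :=
  let buf : List Char := match st.2.1 with
    | none => piece
    | some b => b ++ ',' :: piece
  let d : Int := st.2.2 + (piece.count '(' : Int) - (piece.count ')' : Int)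
  if d = 0 then (st.1 ++ [buf], none, d) else (st.1, some buf, d)

def pvFinishB (st : List (List Char) × Option (List Char) × Int) : List String :=
  let il : List (List Char) × List Char := match st.2.1 with
    | none => (st.1.dropLast, st.1.getLastD [])
    | some b => (st.1, b)
  let stripped := PySem.Chars.strip il.2
  il.1.map (fun s => String.mk (PySem.Chars.strip s)) ++
    (if stripped ≠ [] then [String.mk stripped] else [])

def split_select_columns_py_alt (select_clause : String) : List String :=
  pvFinishB ((select_clause.toList.splitOn ',').foldl pvStepB ([], none, 0))

-- ===== PRECONDITION & SPEC =====
def Spec_split_select_columns_py (select_clause : String) (out : List String) : Prop := out = split_select_columns_py_alt select_clause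
instance (select_clause : String) (out : List String) : Decidable (Spec_split_select_columns_py select_clause out) := by unfold Spec_split_select_columns_py; infer_instance

-- ===== CLAIM (what is proved, stated in full; the proofs are below) =====
def Claim_equal_split_select_columns_py : Prop := ∀ (select_clause : String), Dom_split_select_columns_py select_clause → Spec_split_select_columns_py select_clause (split_select_columns_py select_clause)

-- ===== LEMMAS AND PROOFS =====

-- reference: the raw top-level segments of cs, starting from pending segment `cur` at depth `d`
def pvRef (cs : List Char) (cur : List Char) (d : Int) : List (List Char) :=
  match cs with
  | [] => [cur]
  | c :: rest =>
    if c = '(' then pvRef rest (cur ++ [c]) (d + 1)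
    else if c = ')' then pvRef rest (cur ++ [c]) (d - 1)
    else if c = ',' ∧ d = 0 then cur :: pvRef rest [] 0
    else pvRef rest (cur ++ [c]) d

-- shared finish: strip all segments, drop a trailing empty one
def pvFin (L : List (List Char)) : List String :=
  L.dropLast.map (fun s => String.mk (PySem.Chars.strip s)) ++
    (if PySem.Chars.strip (L.getLastD []) ≠ [] then [String.mk (PySem.Chars.strip (L.getLastD []))] else [])

theorem pvRef_ne_nil (cs cur : List Char) (d : Int) : pvRef cs cur d ≠ [] := by
  induction cs generalizing cur d with
  | nil => simp [pvRef]
  | cons c rest ih =>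
    simp only [pvRef]
    split_ifs <;> simp [ih]

theorem pvFin_cons (cur : List Char) (L : List (List Char)) (h : L ≠ []) :
    pvFin (cur :: L) = String.mk (PySem.Chars.strip cur) :: pvFin L := by
  unfold pvFin
  rcases L.eq_nil_or_concat with rfl | ⟨M, x, rfl⟩
  · exact absurd rfl h
  · have h1 : cur :: M.concat x = (cur :: M) ++ [x] := by simp
    rw [h1, List.concat_eq_append, List.dropLast_concat, List.getLastD_concat,
        List.dropLast_concat, List.getLastD_concat]
    simp

theorem A_char (cs : List Char) (cols : List String) (cur : List Char) (d : Int) :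
    pvFinishA (cs.foldl pvStepA (cols, cur, d)) = cols ++ pvFin (pvRef cs cur d) := by
  induction cs generalizing cols cur d with
  | nil =>
    simp only [List.foldl_nil, pvFinishA, pvFin, pvRef]
    rw [show ([cur] : List (List Char)).getLastD [] = cur from rfl]
    split_ifs <;> simp
  | cons c rest ih =>
    simp only [List.foldl_cons, pvStepA, pvRef]
    split_ifs with h1 h2 h3
    · exact ih _ _ _
    · exact ih _ _ _
    · obtain ⟨rfl, rfl⟩ := h3
      rw [ih, pvFin_cons _ _ (pvRef_ne_nil _ _ _)]
      simp
    · exact ih _ _ _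

theorem pvRef_cons_ne (c : Char) (rest cur : List Char) (d : Int) (hc : c ≠ ',') :
    pvRef (c :: rest) cur d
      = pvRef rest (cur ++ [c]) (d + (if c = '(' then 1 else 0) - (if c = ')' then 1 else 0)) := by
  by_cases h1 : c = '('
  · subst h1; simp [pvRef]
  · by_cases h2 : c = ')'
    · subst h2; simp [pvRef, h1]
    · simp [pvRef, h1, h2, hc]

theorem pvRef_nocomma (p : List Char) (rest cur : List Char) (d : Int) (h : ',' ∉ p) :
    pvRef (p ++ rest) cur d = pvRef rest (cur ++ p) (d + (p.count '(' : Int) - (p.count ')' : Int)) := by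
  induction p generalizing cur d with
  | nil => simp
  | cons c q ih =>
    have hc : c ≠ ',' := fun hcc => h (hcc ▸ List.mem_cons_self ..)
    have hq : ',' ∉ q := fun hm => h (List.mem_cons_of_mem _ hm)
    rw [List.cons_append, pvRef_cons_ne c _ _ _ hc, ih _ _ hq]
    congr 1
    · simp
    · rcases eq_or_ne c '(' with rfl | hpo
      · simp
        omega
      · rcases eq_or_ne c ')' with rfl | hpc
        · simp
          omega
        · simp [hpo, hpc]

-- recursive form of [','].intercalate
def pvJoin : List (List Char) → List Char
  | [] => []
  | [p] => p
  | p :: q :: rest => p ++ ',' :: pvJoin (q :: rest)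

theorem pvJoin_eq_intercalate (ps : List (List Char)) : pvJoin ps = [','].intercalate ps := by
  induction ps with
  | nil => simp [pvJoin, List.intercalate]
  | cons p rest ih =>
    cases rest with
    | nil => simp [pvJoin, List.intercalate]
    | cons q t =>
      simp only [pvJoin, ih]
      simp [List.intercalate]

theorem mem_splitOnP_not {α : Type} [DecidableEq α] (pr : α → Bool) (xs : List α)
    (p : List α) (hp : p ∈ List.splitOnP pr xs) (x : α) (hx : x ∈ p) : pr x = false := by
  induction xs generalizing p with
  | nil => simp [List.splitOnP_nil] at hp; subst hp; simp at hx
  | cons c rest ih =>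
    rw [List.splitOnP_cons] at hp
    by_cases hc : pr c
    · simp [hc] at hp
      rcases hp with rfl | hp
      · simp at hx
      · exact ih _ hp hx
    · simp [hc] at hp
      rcases hL : List.splitOnP pr rest with _ | ⟨h0, t0⟩
      · exact absurd hL (List.splitOnP_ne_nil _ _)
      · rw [hL] at hp
        simp [List.modifyHead] at hp
        rcases hp with rfl | hp
        · rcases List.mem_cons.1 hx with rfl | hx0
          · simpa using hc
          · exact ih h0 (by simp [hL]) hx0
        · exact ih _ (by simp [hL, hp]) hx

def pvCur : Option (List Char) → List Char
  | none => []
  | some b => b ++ [',']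

theorem B_pieces (ps : List (List Char)) (segs : List (List Char)) (buf : Option (List Char))
    (d : Int) (hne : ps ≠ []) (hnc : ∀ p ∈ ps, ',' ∉ p)
    (hbd : ∀ b, buf = some b → d ≠ 0) :
    pvFinishB (ps.foldl pvStepB (segs, buf, d)) =
      segs.map (fun s => String.mk (PySem.Chars.strip s)) ++
        pvFin (pvRef (pvJoin ps) (pvCur buf) d) := by
  induction ps generalizing segs buf d with
  | nil => exact absurd rfl hne
  | cons p rest ih =>
    have hp : ',' ∉ p := hnc p (List.mem_cons_self ..)
    have hrest : ∀ q ∈ rest, ',' ∉ q := fun q hq => hnc q (List.mem_cons_of_mem _ hq)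
    cases buf with
    | none =>
      simp only [List.foldl_cons, pvStepB, pvCur]
      cases rest with
      | nil =>
        have hstep := pvRef_nocomma p [] [] d hp
        rw [List.append_nil] at hstep
        rw [show pvJoin [p] = p from rfl, hstep, List.nil_append]
        split_ifs with h0
        · simp only [List.foldl_nil, pvFinishB, pvFin, pvRef]
          simp
        · simp only [List.foldl_nil, pvFinishB, pvFin, pvRef]
          simp
      | cons q t =>
        rw [show pvJoin (p :: q :: t) = p ++ ',' :: pvJoin (q :: t) from rfl,
            pvRef_nocomma p _ [] d hp, List.nil_append]
        split_ifs with h0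
        · rw [ih _ none _ (by simp) hrest (by simp)]
          rw [show pvRef (',' :: pvJoin (q :: t)) p (d + (p.count '(' : Int) - (p.count ')' : Int))
              = p :: pvRef (pvJoin (q :: t)) [] 0 by
            simp [pvRef, h0]]
          rw [pvFin_cons _ _ (pvRef_ne_nil _ _ _)]
          simp [pvCur]
          rw [h0]
        · rw [ih _ (some p) _ (by simp) hrest (fun b hb => by simpa using h0)]
          congr 1
          rw [show pvRef (',' :: pvJoin (q :: t)) p (d + (p.count '(' : Int) - (p.count ')' : Int))
              = pvRef (pvJoin (q :: t)) (p ++ [',']) (d + (p.count '(' : Int) - (p.count ')' : Int)) by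
            simp [pvRef, h0]]
          simp [pvCur]
    | some b =>
      have hd : d ≠ 0 := hbd b rfl
      simp only [List.foldl_cons, pvStepB, pvCur]
      cases rest with
      | nil =>
        have hstep := pvRef_nocomma p [] (b ++ [',']) d hp
        rw [List.append_nil] at hstep
        rw [show pvJoin [p] = p from rfl, hstep]
        have hbp : (b ++ [',']) ++ p = b ++ ',' :: p := by simp
        split_ifs with h0
        · simp only [List.foldl_nil, pvFinishB, pvFin, pvRef]
          simp [hbp]
        · simp only [List.foldl_nil, pvFinishB, pvFin, pvRef]
          simp [hbp]
      | cons q t =>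
        rw [show pvJoin (p :: q :: t) = p ++ ',' :: pvJoin (q :: t) from rfl,
            pvRef_nocomma p _ (b ++ [',']) d hp]
        have hbp : (b ++ [',']) ++ p = b ++ ',' :: p := by simp
        split_ifs with h0
        · rw [ih _ none _ (by simp) hrest (by simp)]
          rw [show pvRef (',' :: pvJoin (q :: t)) ((b ++ [',']) ++ p)
                (d + (p.count '(' : Int) - (p.count ')' : Int))
              = ((b ++ [',']) ++ p) :: pvRef (pvJoin (q :: t)) [] 0 by
            simp [pvRef, h0]]
          rw [pvFin_cons _ _ (pvRef_ne_nil _ _ _)]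
          simp [pvCur, hbp]
          rw [h0]
        · rw [ih _ (some (b ++ ',' :: p)) _ (by simp) hrest (fun b' hb' => by simpa using h0)]
          congr 1
          rw [show pvRef (',' :: pvJoin (q :: t)) ((b ++ [',']) ++ p)
                (d + (p.count '(' : Int) - (p.count ')' : Int))
              = pvRef (pvJoin (q :: t)) (((b ++ [',']) ++ p) ++ [','])
                (d + (p.count '(' : Int) - (p.count ')' : Int)) by
            simp [pvRef, h0]]
          simp [pvCur]

-- ===== VERDICT (by name: the statement is the Claim_ definition above) =====
theorem split_select_columns_py_spec : Claim_equal_split_select_columns_py := by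
  intro s _
  unfold Spec_split_select_columns_py split_select_columns_py split_select_columns_py_alt
  rw [A_char]
  have hne : s.toList.splitOn ',' ≠ [] := by
    simpa [List.splitOn] using List.splitOnP_ne_nil (fun c => c == ',') s.toList
  have hnc : ∀ p ∈ s.toList.splitOn ',', ',' ∉ p := by
    intro p hp hm
    have := mem_splitOnP_not (fun c => c == ',') s.toList p (by simpa [List.splitOn] using hp) ',' hm
    simp at this
  have hjoin : pvJoin (s.toList.splitOn ',') = s.toList := by
    rw [pvJoin_eq_intercalate]
    exact List.intercalate_splitOn s.toList ','
  rw [B_pieces _ _ _ _ hne hnc (by simp), hjoin]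
  simp [pvCur]
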